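-- pv_equiv track=rewrite | github.com/viktorb1/leetcode | alien-dictionary/alien-dictionary.py | mergeKStrings
-- ===== SOURCE A (Python) =====
-- def mergeKStrings(ans):
--     sol = []
--     quit = False
--     while not quit:
--         quit = True
--         smallest = '~'
--         smallest_idx = float('inf')
--
--         for k in range(len(ans)):
--             if ans[k] != '':
--                 if ans[k][0] < smallest:
--                     smallest = ans[k][0]
--                     smallest_idx = k
--
--                 quit = False
--
--         if not quit:
--             ans[smallest_idx] = ans[smallest_idx][1:]
--             sol.append(smallest)
--
--     return ''.join(sol)
-- ===== SOURCE B (Python) =====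
-- def _insert(q, key):
--     # ordered insert into an ascending worklist
--     j = 0
--     while j < len(q) and q[j] < key:
--         j += 1
--     q.insert(j, key)
--
--
-- def mergeKStrings(ans):
--     # sorted worklist of (head_char, index); pop the front, re-insert the
--     # advanced string's new head.  Does not mutate ans (A does).
--     rem = list(ans)
--     q = []
--     for i, s in enumerate(rem):
--         if s:
--             _insert(q, (s[0], i))
--     out = []
--     while q:
--         c, i = q[0]
--         del q[0]
--         out.append(c)
--         rem[i] = rem[i][1:]
--         s = rem[i]
--         if s:
--             _insert(q, (s[0], i))
--     return ''.join(out)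
-- ===== Notes on version B (the rewrite author's own statement) =====
-- stated objective: alternative
-- what changed: A rescans every string on each iteration keeping a running minimum; B builds a sorted worklist of (head_char, index) pairs once, then pops the front and re-inserts only the advanced string's new head. Pre_ excludes inputs where some string contains '~': A's scan never selects a '~' head and eventually raises TypeError indexing ans[float('inf')]; B naturally returns the full merged string there.
import Mathlib
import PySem

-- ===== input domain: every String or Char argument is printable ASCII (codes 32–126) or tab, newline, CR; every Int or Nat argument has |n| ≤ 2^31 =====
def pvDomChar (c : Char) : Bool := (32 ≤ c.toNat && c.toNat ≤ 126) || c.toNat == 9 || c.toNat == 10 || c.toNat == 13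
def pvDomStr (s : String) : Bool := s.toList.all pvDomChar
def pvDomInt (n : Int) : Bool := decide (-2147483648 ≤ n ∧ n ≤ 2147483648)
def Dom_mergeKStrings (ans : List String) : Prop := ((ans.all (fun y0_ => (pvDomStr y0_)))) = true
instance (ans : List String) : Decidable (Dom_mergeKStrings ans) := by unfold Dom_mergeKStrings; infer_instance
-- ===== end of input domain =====

-- B replaces A's full rescan per output character by a sorted worklist of (head, index)
-- pairs (pop front, re-insert the advanced string's new head); equivalence is about the
-- RETURN value only — Python A mutates its argument list in place, B does not.

-- ===== PORT A =====
-- the inner `for k in range(len(ans))` loop: state (quit, smallest, smallest_idx);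
-- smallest_idx = none plays float('inf')
def scanA : List (List Char) → Nat → Bool → Char → Option Nat → Bool × Char × Option Nat
  | [], _, quit, sm, idx => (quit, sm, idx)
  | s :: rest, k, quit, sm, idx =>
    match s with
    | [] => scanA rest (k + 1) quit sm idx
    | c :: _ =>
      if c < sm then scanA rest (k + 1) false c (some k)
      else scanA rest (k + 1) false sm idx

-- the outer `while not quit` loop; fuel (total length + 1) always suffices since every
-- non-final iteration consumes one character.  In the (false, _, none) case Python
-- raises TypeError (ans[float('inf')]); that case is excluded by Pre_mergeKStrings.
def loopA : Nat → List (List Char) → List Char → List Char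
  | 0, _, sol => sol.reverse
  | fuel + 1, rem, sol =>
    match scanA rem 0 true '~' none with
    | (true, _, _) => sol.reverse
    | (false, _, none) => sol.reverse
    | (false, sm, some i) => loopA fuel (rem.set i ((rem.getD i []).drop 1)) (sm :: sol)

def mergeKStrings (ans : List String) : String :=
  String.ofList (loopA (((ans.map String.toList).map List.length).sum + 1) (ans.map String.toList) [])

-- ===== PORT B =====
-- Python tuple comparison (c, i) < (c', i') on Char × Nat
def pairLt (a b : Char × Nat) : Bool := a.1 < b.1 || (a.1 == b.1 && a.2 < b.2)

-- Source B's _insert: ordered insert before the first element not < key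
def insQ : List (Char × Nat) → (Char × Nat) → List (Char × Nat)
  | [], key => [key]
  | p :: rest, key => if pairLt p key then p :: insQ rest key else key :: p :: rest

-- Source B's initial for-loop body over enumerate(rem)
def initStep (q : List (Char × Nat)) (p : List Char × Nat) : List (Char × Nat) :=
  match p.1 with
  | [] => q
  | c :: _ => insQ q (c, p.2)

def initQ (rem : List (List Char)) : List (Char × Nat) :=
  rem.zipIdx.foldl initStep []

-- Source B's `while q` loop
def loopB : Nat → List (List Char) → List Char → List (Char × Nat) → List Char
  | 0, _, out, _ => out.reverse
  | _ + 1, _, out, [] => out.reverse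
  | fuel + 1, rem, out, (c, i) :: q =>
    let rem' := rem.set i ((rem.getD i []).drop 1)
    match rem'.getD i [] with
    | [] => loopB fuel rem' (c :: out) q
    | c' :: _ => loopB fuel rem' (c :: out) (insQ q (c', i))

def mergeKStrings_alt (ans : List String) : String :=
  String.ofList (loopB (((ans.map String.toList).map List.length).sum + 1) (ans.map String.toList) [] (initQ (ans.map String.toList)))

-- ===== PRECONDITION & SPEC =====
-- Pre_ excludes exactly the inputs on which A raises: if some string contains '~'
-- (the sentinel A initialises `smallest` with), that '~' head is never selected and A
-- eventually indexes ans[float('inf')] → TypeError.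
def Pre_mergeKStrings (ans : List String) : Prop := ∀ s ∈ ans, '~' ∉ s.toList
instance (ans : List String) : Decidable (Pre_mergeKStrings ans) := by
  unfold Pre_mergeKStrings; infer_instance

def pvWitness_mergeKStrings : List String := ["ba", "ab", ""]

def Spec_mergeKStrings (ans : List String) (out : String) : Prop := out = mergeKStrings_alt ans
instance (ans : List String) (out : String) : Decidable (Spec_mergeKStrings ans out) := by
  unfold Spec_mergeKStrings; infer_instance

-- ===== CLAIM (what is proved, stated in full; the proofs are below) =====
def Claim_equal_mergeKStrings : Prop := ∀ (ans : List String), Dom_mergeKStrings ans → Pre_mergeKStrings ans → Spec_mergeKStrings ans (mergeKStrings ans)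

-- ===== LEMMAS AND PROOFS =====

-- the (head char, index) pairs of the nonempty entries, indices starting at k
def headsOf : List (List Char) → Nat → List (Char × Nat)
  | [], _ => []
  | [] :: rest, k => headsOf rest (k + 1)
  | (c :: _) :: rest, k => (c, k) :: headsOf rest (k + 1)

-- the running-minimum state of A's scan
def runMin : Char → Option Nat → List (Char × Nat) → Char × Option Nat
  | sm, idx, [] => (sm, idx)
  | sm, idx, (c, i) :: t => if c < sm then runMin c (some i) t else runMin sm idx t

def PLt (a b : Char × Nat) : Prop := pairLt a b = true

-- the simulation invariant: the worklist is sorted and holds exactly the head pairs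
def InvQ (rem : List (List Char)) (q : List (Char × Nat)) : Prop :=
  List.Pairwise PLt q ∧ ∀ p : Char × Nat, p ∈ q ↔ ∃ t, rem[p.2]? = some (p.1 :: t)

def AllLt (rem : List (List Char)) : Prop := ∀ s ∈ rem, ∀ c ∈ s, c < '~'

theorem getElem?_some_mem {α : Type} {l : List α} {j : Nat} {x : α}
    (h : l[j]? = some x) : x ∈ l := by
  obtain ⟨hj, hx⟩ := List.getElem?_eq_some_iff.mp h
  exact hx ▸ List.getElem_mem hj

theorem pLt_iff (a b : Char × Nat) :
    PLt a b ↔ a.1 < b.1 ∨ (a.1 = b.1 ∧ a.2 < b.2) := by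
  simp [PLt, pairLt]

theorem pLt_irrefl (a : Char × Nat) : ¬ PLt a a := by
  simp [pLt_iff]

theorem pLt_trans {a b c : Char × Nat} (h1 : PLt a b) (h2 : PLt b c) : PLt a c := by
  rw [pLt_iff] at *
  rcases h1 with h1 | ⟨h1, h1'⟩ <;> rcases h2 with h2 | ⟨h2, h2'⟩
  · exact Or.inl (lt_trans h1 h2)
  · exact Or.inl (h2 ▸ h1)
  · exact Or.inl (h1 ▸ h2)
  · exact Or.inr ⟨h1.trans h2, h1'.trans h2'⟩

theorem pLt_total {a b : Char × Nat} (h : ¬ PLt a b) (hne : a ≠ b) : PLt b a := by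
  rw [pLt_iff] at *
  rcases lt_trichotomy a.1 b.1 with hc | hc | hc
  · exact absurd (Or.inl hc) h
  · rcases Nat.lt_trichotomy a.2 b.2 with hi | hi | hi
    · exact absurd (Or.inr ⟨hc, hi⟩) h
    · exact absurd (Prod.ext hc hi) hne
    · exact Or.inr ⟨hc.symm, hi⟩
  · exact Or.inl hc

theorem mem_insQ (q : List (Char × Nat)) (key x : Char × Nat) :
    x ∈ insQ q key ↔ x = key ∨ x ∈ q := by
  induction q with
  | nil => simp [insQ]
  | cons p rest ih =>
    simp only [insQ]
    split
    · simp [ih]; tauto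
    · exact List.mem_cons

theorem pairwise_insQ {q : List (Char × Nat)} {key : Char × Nat}
    (hs : List.Pairwise PLt q) (hk : key ∉ q) : List.Pairwise PLt (insQ q key) := by
  induction q with
  | nil => simp [insQ, List.pairwise_cons]
  | cons p rest ih =>
    simp only [insQ]
    rcases List.pairwise_cons.mp hs with ⟨hp, hrest⟩
    split
    · rename_i hlt
      refine List.pairwise_cons.mpr ⟨?_, ih hrest (fun h => hk (List.mem_cons_of_mem _ h))⟩
      intro x hx
      rcases (mem_insQ _ _ _).mp hx with rfl | hx
      · exact hlt
      · exact hp x hx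
    · rename_i hnlt
      have hne : p ≠ key := fun h => hk (h ▸ List.mem_cons_self)
      have hkp : PLt key p := pLt_total hnlt hne
      refine List.pairwise_cons.mpr ⟨?_, hs⟩
      intro x hx
      rcases List.mem_cons.mp hx with rfl | hx
      · exact hkp
      · exact pLt_trans hkp (hp x hx)

theorem scanA_eq (rem : List (List Char)) : ∀ (k : Nat) (quit : Bool) (sm : Char) (idx : Option Nat),
    scanA rem k quit sm idx = ((quit && rem.all List.isEmpty), runMin sm idx (headsOf rem k)) := by
  induction rem with
  | nil => intro k quit sm idx; simp [scanA, headsOf, runMin]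
  | cons s rest ih =>
    intro k quit sm idx
    match s with
    | [] => simp [scanA, headsOf, ih]
    | c :: cs =>
      simp only [scanA, headsOf, runMin]
      by_cases hc : c < sm
      · rw [if_pos hc, if_pos hc, ih]; simp
      · rw [if_neg hc, if_neg hc, ih]; simp

theorem mem_headsOf (rem : List (List Char)) : ∀ (k : Nat) (c : Char) (i : Nat),
    (c, i) ∈ headsOf rem k ↔ ∃ j t, i = k + j ∧ rem[j]? = some (c :: t) := by
  induction rem with
  | nil => intro k c i; simp [headsOf]
  | cons s rest ih =>
    intro k c i
    match s with
    | [] =>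
      simp only [headsOf, ih]
      constructor
      · rintro ⟨j, t, rfl, hj⟩
        exact ⟨j + 1, t, by omega, by simpa using hj⟩
      · rintro ⟨j, t, rfl, hj⟩
        match j with
        | 0 => simp at hj
        | j' + 1 => exact ⟨j', t, by omega, by simpa using hj⟩
    | c' :: cs =>
      simp only [headsOf, List.mem_cons, ih, Prod.mk.injEq]
      constructor
      · rintro (⟨rfl, rfl⟩ | ⟨j, t, rfl, hj⟩)
        · exact ⟨0, cs, by omega, by simp⟩
        · exact ⟨j + 1, t, by omega, by simpa using hj⟩
      · rintro ⟨j, t, hi, hj⟩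
        match j with
        | 0 =>
          simp at hj
          exact Or.inl ⟨hj.1.symm, by omega⟩
        | j' + 1 =>
          exact Or.inr ⟨j', t, by omega, by simpa using hj⟩

theorem mem_headsOf_zero (rem : List (List Char)) (c : Char) (i : Nat) :
    (c, i) ∈ headsOf rem 0 ↔ ∃ t, rem[i]? = some (c :: t) := by
  rw [mem_headsOf]
  constructor
  · rintro ⟨j, t, hji, hj⟩
    have : j = i := by omega
    exact ⟨t, this ▸ hj⟩
  · rintro ⟨t, ht⟩
    exact ⟨i, t, by omega, ht⟩

theorem headsOf_idx_ge (rem : List (List Char)) : ∀ (k : Nat) (p : Char × Nat),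
    p ∈ headsOf rem k → k ≤ p.2 := by
  induction rem with
  | nil => intro k p h; simp [headsOf] at h
  | cons s rest ih =>
    intro k p h
    match s with
    | [] => exact Nat.le_of_succ_le (ih (k + 1) p h)
    | c :: cs =>
      rcases List.mem_cons.mp h with rfl | h
      · exact Nat.le_refl _
      · exact Nat.le_of_succ_le (ih (k + 1) p h)

theorem headsOf_idx_sorted (rem : List (List Char)) : ∀ (k : Nat),
    List.Pairwise (fun a b : Char × Nat => a.2 < b.2) (headsOf rem k) := by
  induction rem with
  | nil => intro k; simp [headsOf]
  | cons s rest ih =>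
    intro k
    match s with
    | [] => exact ih (k + 1)
    | c :: cs =>
      refine List.pairwise_cons.mpr ⟨?_, ih (k + 1)⟩
      intro p hp
      exact Nat.lt_of_lt_of_le (Nat.lt_succ_self k) (headsOf_idx_ge rest (k + 1) p hp)

theorem headsOf_of_empty (rem : List (List Char)) : ∀ (k : Nat),
    (∀ s ∈ rem, s = []) → headsOf rem k = [] := by
  induction rem with
  | nil => intro k _; rfl
  | cons s rest ih =>
    intro k h
    have hs := h s List.mem_cons_self
    subst hs
    exact ih (k + 1) (fun s hs => h s (List.mem_cons_of_mem _ hs))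

theorem runMin_noupdate (L : List (Char × Nat)) : ∀ (sm : Char) (idx : Option Nat),
    (∀ p ∈ L, ¬ (p.1 < sm)) → runMin sm idx L = (sm, idx) := by
  induction L with
  | nil => intro sm idx _; rfl
  | cons hd rest ih =>
    intro sm idx h
    obtain ⟨c, i⟩ := hd
    simp only [runMin]
    rw [if_neg (h (c, i) List.mem_cons_self)]
    exact ih sm idx (fun p hp => h p (List.mem_cons_of_mem _ hp))

theorem runMin_min (L : List (Char × Nat)) : ∀ (sm : Char) (idx : Option Nat) (c : Char) (i : Nat),
    (c, i) ∈ L → c < sm →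
    (∀ p ∈ L, p ≠ (c, i) → PLt (c, i) p) →
    List.Pairwise (fun a b : Char × Nat => a.2 < b.2) L →
    runMin sm idx L = (c, some i) := by
  induction L with
  | nil => intro sm idx c i h; simp at h
  | cons h0 rest ih =>
    intro sm idx c i hmem hsm hmin hpw
    rcases List.pairwise_cons.mp hpw with ⟨hidx, hpw'⟩
    by_cases he : h0 = (c, i)
    · subst he
      simp only [runMin, if_pos hsm]
      apply runMin_noupdate
      intro p hp
      have hne : p ≠ (c, i) := by
        intro h
        rw [h] at hp
        exact Nat.lt_irrefl _ (hidx _ hp)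
      have hplt := (pLt_iff _ _).mp (hmin p (List.mem_cons_of_mem _ hp) hne)
      rcases hplt with h | ⟨h, _⟩
      · exact fun h' => absurd (lt_trans h' h) (lt_irrefl _)
      · exact fun h' => absurd (h ▸ h') (lt_irrefl _)
    · have hmem' : (c, i) ∈ rest := by
        rcases List.mem_cons.mp hmem with h | h
        · exact absurd h.symm he
        · exact h
      have hi0 : h0.2 < i := hidx (c, i) hmem'
      have hlt : c < h0.1 := by
        have hplt := (pLt_iff _ _).mp (hmin h0 List.mem_cons_self he)
        rcases hplt with h | ⟨_, h⟩
        · exact h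
        · omega
      obtain ⟨c0, i0⟩ := h0
      simp only [runMin]
      have hmin' : ∀ p ∈ rest, p ≠ (c, i) → PLt (c, i) p :=
        fun p hp => hmin p (List.mem_cons_of_mem _ hp)
      split
      · exact ih c0 (some i0) c i hmem' hlt hmin' hpw'
      · exact ih sm idx c i hmem' hsm hmin' hpw'

theorem scanA_of_empty (rem : List (List Char)) (k : Nat) (quit : Bool) (sm : Char) (idx : Option Nat)
    (h : ∀ s ∈ rem, s = []) : scanA rem k quit sm idx = (quit, sm, idx) := by
  rw [scanA_eq]
  have h1 : rem.all List.isEmpty = true := by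
    rw [List.all_eq_true]; intro s hs; rw [h s hs]; rfl
  rw [h1, headsOf_of_empty rem k h]
  simp [runMin]

theorem allLt_head {rem : List (List Char)} (hlt : AllLt rem) {c : Char} {j : Nat} {t : List Char}
    (h : rem[j]? = some (c :: t)) : c < '~' :=
  hlt _ (getElem?_some_mem h) c List.mem_cons_self

theorem scanA_of_head {rem : List (List Char)} {q : List (Char × Nat)} {c : Char} {i : Nat}
    (hlt : AllLt rem) (hinv : InvQ rem ((c, i) :: q)) :
    scanA rem 0 true '~' none = (false, c, some i) := by
  obtain ⟨hpw, hmem⟩ := hinv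
  obtain ⟨t, ht⟩ := (hmem (c, i)).mp List.mem_cons_self
  rw [scanA_eq]
  have hne : rem.all List.isEmpty = false :=
    List.all_eq_false.mpr ⟨c :: t, getElem?_some_mem ht, by simp⟩
  rw [hne]
  have hin : (c, i) ∈ headsOf rem 0 := (mem_headsOf_zero rem c i).mpr ⟨t, ht⟩
  have hminp : ∀ p ∈ headsOf rem 0, p ≠ (c, i) → PLt (c, i) p := by
    intro p hp hne'
    obtain ⟨pc, pi⟩ := p
    obtain ⟨u, hu⟩ := (mem_headsOf_zero rem pc pi).mp hp
    have hpq : (pc, pi) ∈ (c, i) :: q := (hmem (pc, pi)).mpr ⟨u, hu⟩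
    rcases List.mem_cons.mp hpq with h | h
    · exact absurd h hne'
    · exact (List.pairwise_cons.mp hpw).1 _ h
  have hc : c < '~' := allLt_head hlt ht
  rw [runMin_min (headsOf rem 0) '~' none c i hin hc hminp (headsOf_idx_sorted rem 0)]
  simp

-- index i does not occur in the tail of the queue
theorem idx_not_in_tail {rem : List (List Char)} {q : List (Char × Nat)} {c : Char} {i : Nat}
    (hinv : InvQ rem ((c, i) :: q)) : ∀ c', (c', i) ∉ q := by
  obtain ⟨hpw, hmem⟩ := hinv
  intro c' hq
  obtain ⟨t, ht⟩ := (hmem (c, i)).mp List.mem_cons_self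
  obtain ⟨t', ht'⟩ := (hmem (c', i)).mp (List.mem_cons_of_mem _ hq)
  rw [ht] at ht'
  have hcc : c' = c := by
    injection ht' with h1
    injection h1 with h2 h3
    exact h2.symm
  subst hcc
  exact pLt_irrefl _ ((List.pairwise_cons.mp hpw).1 _ hq)

theorem inv_step {rem : List (List Char)} {q : List (Char × Nat)} {c : Char} {i : Nat} {t : List Char}
    (hinv : InvQ rem ((c, i) :: q)) (ht : rem[i]? = some (c :: t)) :
    InvQ (rem.set i t) (match t with | [] => q | c' :: _ => insQ q (c', i)) := by
  obtain ⟨hpw, hmem⟩ := hinv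
  have hilen : i < rem.length := (List.getElem?_eq_some_iff.mp ht).1
  have hget : ∀ j : Nat, (rem.set i t)[j]? = if j = i then some t else rem[j]? := by
    intro j
    by_cases h : j = i
    · subst h; rw [List.getElem?_set_self hilen]; simp
    · rw [List.getElem?_set_ne (fun h' => h h'.symm)]; simp [h]
  have hnotin := idx_not_in_tail ⟨hpw, hmem⟩
  have hqmem : ∀ p : Char × Nat, p ∈ q ↔ (p.2 ≠ i ∧ ∃ u, rem[p.2]? = some (p.1 :: u)) := by
    intro p
    constructor
    · intro hp
      refine ⟨?_, (hmem p).mp (List.mem_cons_of_mem _ hp)⟩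
      intro h
      apply hnotin p.1
      have hp' : (p.1, p.2) ∈ q := by simpa using hp
      rwa [h] at hp'
    · rintro ⟨hne, hu⟩
      rcases List.mem_cons.mp ((hmem p).mpr hu) with h | h
      · exact absurd (by rw [h]) hne
      · exact h
  match t with
  | [] =>
    refine ⟨(List.pairwise_cons.mp hpw).2, ?_⟩
    intro p
    rw [hqmem p, hget p.2]
    constructor
    · rintro ⟨hne, hu⟩; rw [if_neg hne]; exact hu
    · intro h
      by_cases hpi : p.2 = i
      · rw [if_pos hpi] at h
        obtain ⟨u, hu⟩ := h
        exact absurd hu (by simp)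
      · rw [if_neg hpi] at h; exact ⟨hpi, h⟩
  | c' :: t' =>
    refine ⟨pairwise_insQ (List.pairwise_cons.mp hpw).2 (hnotin c'), ?_⟩
    intro p
    rw [mem_insQ, hqmem p, hget p.2]
    constructor
    · rintro (rfl | ⟨hne, hu⟩)
      · simp
      · rw [if_neg hne]; exact hu
    · intro h
      by_cases hpi : p.2 = i
      · rw [if_pos hpi] at h
        obtain ⟨u, hu⟩ := h
        have h1 : p.1 = c' := by
          injection hu with h'
          injection h' with h'' _
          exact h''.symm
        exact Or.inl (Prod.ext h1 hpi)
      · rw [if_neg hpi] at h; exact Or.inr ⟨hpi, h⟩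

theorem allLt_step {rem : List (List Char)} {i : Nat} {t : List Char} {c : Char}
    (hlt : AllLt rem) (ht : rem[i]? = some (c :: t)) : AllLt (rem.set i t) := by
  intro s hs
  rcases List.mem_or_eq_of_mem_set hs with h | rfl
  · exact hlt s h
  · intro ch hch
    exact hlt _ (getElem?_some_mem ht) ch (List.mem_cons_of_mem _ hch)

theorem loop_eq (fuel : Nat) : ∀ (rem : List (List Char)) (sol : List Char) (q : List (Char × Nat)),
    AllLt rem → InvQ rem q → loopA fuel rem sol = loopB fuel rem sol q := by
  induction fuel with
  | zero => intro rem sol q _ _; rfl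
  | succ n ih =>
    intro rem sol q hlt hinv
    match q with
    | [] =>
      have hempty : ∀ s ∈ rem, s = [] := by
        intro s hs
        match s with
        | [] => rfl
        | c :: t =>
          obtain ⟨j, hj, hget⟩ := List.getElem_of_mem hs
          have hmem : (c, j) ∈ ([] : List (Char × Nat)) :=
            (hinv.2 (c, j)).mpr ⟨t, by rw [List.getElem?_eq_getElem hj, hget]⟩
          simp at hmem
      simp only [loopA, loopB, scanA_of_empty rem 0 true '~' none hempty]
    | (c, i) :: q' =>
      obtain ⟨t, ht⟩ := (hinv.2 (c, i)).mp List.mem_cons_self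
      have hilen : i < rem.length := (List.getElem?_eq_some_iff.mp ht).1
      have hgetD : rem.getD i [] = c :: t := by
        rw [List.getD_eq_getElem?_getD, ht]; rfl
      have hdrop : (rem.getD i []).drop 1 = t := by rw [hgetD]; rfl
      have hgetD' : (rem.set i t).getD i [] = t := by
        rw [List.getD_eq_getElem?_getD, List.getElem?_set_self hilen]; rfl
      have hstepA : loopA (n + 1) rem sol = loopA n (rem.set i t) (c :: sol) := by
        simp only [loopA, scanA_of_head hlt hinv, hdrop]
      have hInv' := inv_step hinv ht
      have hlt' := allLt_step hlt ht
      rw [hstepA]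
      cases t with
      | nil =>
        simp only [loopB, hdrop, hgetD']
        exact ih _ _ _ hlt' hInv'
      | cons c' t' =>
        simp only [loopB, hdrop, hgetD']
        exact ih _ _ _ hlt' hInv'

theorem initQ_fold (l : List (List Char)) : ∀ (k : Nat) (q : List (Char × Nat)),
    List.Pairwise PLt q → (∀ p ∈ q, p.2 < k) →
    List.Pairwise PLt ((l.zipIdx k).foldl initStep q) ∧
      (∀ p, p ∈ (l.zipIdx k).foldl initStep q ↔ p ∈ q ∨ p ∈ headsOf l k) := by
  induction l with
  | nil =>
    intro k q hpw _
    refine ⟨hpw, ?_⟩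
    intro p; simp [headsOf]
  | cons s rest ih =>
    intro k q hpw hbound
    rw [List.zipIdx_cons]
    match s with
    | [] =>
      have := ih (k + 1) q hpw (fun p hp => Nat.lt_succ_of_lt (hbound p hp))
      simpa [List.foldl_cons, initStep, headsOf] using this
    | c :: cs =>
      have hkq : (c, k) ∉ q := fun h => Nat.lt_irrefl k (hbound (c, k) h)
      have hpw' : List.Pairwise PLt (insQ q (c, k)) := pairwise_insQ hpw hkq
      have hbound' : ∀ p ∈ insQ q (c, k), p.2 < k + 1 := by
        intro p hp
        rcases (mem_insQ _ _ _).mp hp with rfl | hp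
        · exact Nat.lt_succ_self k
        · exact Nat.lt_succ_of_lt (hbound p hp)
      obtain ⟨h1, h2⟩ := ih (k + 1) (insQ q (c, k)) hpw' hbound'
      refine ⟨by simpa [List.foldl_cons, initStep] using h1, ?_⟩
      intro p
      have := h2 p
      simp only [List.foldl_cons, initStep, headsOf, List.mem_cons]
      rw [this, mem_insQ]
      tauto

theorem initQ_inv (rem : List (List Char)) : InvQ rem (initQ rem) := by
  obtain ⟨h1, h2⟩ := initQ_fold rem 0 [] (by simp) (by simp)
  refine ⟨h1, ?_⟩
  intro p
  obtain ⟨c, i⟩ := p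
  rw [initQ.eq_def, h2 (c, i)]
  simp [mem_headsOf_zero]

theorem allLt_of_dom_pre {ans : List String} (hdom : Dom_mergeKStrings ans)
    (hpre : Pre_mergeKStrings ans) : AllLt (ans.map String.toList) := by
  intro s hs c hc
  obtain ⟨s0, hs0, rfl⟩ := List.mem_map.mp hs
  have hd : pvDomStr s0 = true := List.all_eq_true.mp hdom s0 hs0
  have hcdom : pvDomChar c = true := List.all_eq_true.mp hd c hc
  have hle : c.toNat ≤ 126 := by
    simp only [pvDomChar, Bool.or_eq_true, Bool.and_eq_true, decide_eq_true_eq, beq_iff_eq] at hcdom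
    omega
  have hne : c ≠ '~' := fun h => hpre s0 hs0 (h ▸ hc)
  have hne' : c.toNat ≠ 126 := by
    intro h
    apply hne
    apply Char.ext
    apply UInt32.toNat_inj.mp
    exact h.trans rfl
  have : c.toNat < Char.toNat '~' := by
    have h126 : Char.toNat '~' = 126 := rfl
    omega
  simpa [Char.lt_def, UInt32.lt_iff_toNat_lt] using this

-- ===== VERDICT (by name: the statement is the Claim_ definition above) =====
theorem mergeKStrings_spec : Claim_equal_mergeKStrings := by
  intro ans hdom hpre
  unfold Spec_mergeKStrings mergeKStrings mergeKStrings_alt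
  rw [loop_eq (((ans.map String.toList).map List.length).sum + 1)
    (ans.map String.toList) [] (initQ (ans.map String.toList))
    (allLt_of_dom_pre hdom hpre) (initQ_inv _)]
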